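-- pv_equiv track=rewrite | github.com/BillG80/gy9163-AHRS | tools/fontcvt.py | enhance_degree_character
-- ===== SOURCE A (Python) =====
-- def enhance_degree_character(mask_data, width, height):
--     """Special enhancement for the degree (°) character to fix the issue with multiple circles."""
--     # Convert to 2D array for easier processing
--     mask_2d = [[0 for x in range(width)] for y in range(height)]
--     for y in range(height):
--         for x in range(width):
--             mask_2d[y][x] = mask_data[y * width + x]
--
--     # Find the bounds of the character
--     left_x = width
--     right_x = -1
--     top_y = height
--     bottom_y = -1
--
--     for y in range(height):
--         for x in range(width):
--             if mask_2d[y][x] == 1: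
--                 left_x = min(left_x, x)
--                 right_x = max(right_x, x)
--                 top_y = min(top_y, y)
--                 bottom_y = max(bottom_y, y)
--
--     # If we couldn't find any pixels, return the original data
--     if left_x > right_x or top_y > bottom_y:
--         return mask_data
--
--     # 1. Clear the existing character
--     for y in range(height):
--         for x in range(width):
--             mask_2d[y][x] = 0
--
--     # 2. Calculate the center and dimensions
--     center_x = (left_x + right_x) // 2
--
--     # Make the degree symbol extremely small - just a single pixel
--     # Position it at the top of the character space
--     if top_y >= 0 and top_y < height and center_x >= 0 and center_x < width:
--         mask_2d[top_y][center_x] = 1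
--
--     # Convert back to 1D array
--     final_data = []
--     for y in range(height):
--         for x in range(width):
--             final_data.append(mask_2d[y][x])
--
--     return final_data
-- ===== SOURCE B (Python) =====
-- def enhance_degree_character(mask_data, width, height):
--     """Special enhancement for the degree (°) character to fix the issue with multiple circles."""
--     # Flatten via the same row-major reads A performs (same IndexError behaviour).
--     cells = [mask_data[y * width + x] for y in range(height) for x in range(width)]
--     if 1 not in cells:
--         return mask_data
--     # First set pixel in row-major order lies in the topmost occupied row.
--     top_y = cells.index(1) // width
--     # Column projection: occupied columns, in increasing order.
--     cols = [x for x in range(width)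
--             if any(cells[y * width + x] == 1 for y in range(height))]
--     center_x = (cols[0] + cols[-1]) // 2
--     out = [0] * (width * height)
--     out[top_y * width + center_x] = 1
--     return out
-- ===== Notes on version B (the rewrite author's own statement) =====
-- stated objective: alternative
-- what changed: Replaces A's running min/max bounding-box scan over a materialized 2D grid (build, bounds scan, clear, set, flatten) with a search-based plan on the flat list: list.index of the first set pixel gives the top row, a column-projection filter of range(width) (a column is kept if any row has a 1 there) gives the occupied columns whose first and last entries are the horizontal extremes.
-- intended difference: When width<0 and height<0 and mask_data is nonempty, A returns [] (its sentinel bounds left_x=width, top_y=height slip past the 'no pixels found' test, and all loops are empty), while B returns mask_data unchanged, which is the intended 'nothing to enhance' behaviour for a degenerate image. — e.g. on enhance_degree_character([1], -1, -1): A returns [], B returns [1]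
import Mathlib
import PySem

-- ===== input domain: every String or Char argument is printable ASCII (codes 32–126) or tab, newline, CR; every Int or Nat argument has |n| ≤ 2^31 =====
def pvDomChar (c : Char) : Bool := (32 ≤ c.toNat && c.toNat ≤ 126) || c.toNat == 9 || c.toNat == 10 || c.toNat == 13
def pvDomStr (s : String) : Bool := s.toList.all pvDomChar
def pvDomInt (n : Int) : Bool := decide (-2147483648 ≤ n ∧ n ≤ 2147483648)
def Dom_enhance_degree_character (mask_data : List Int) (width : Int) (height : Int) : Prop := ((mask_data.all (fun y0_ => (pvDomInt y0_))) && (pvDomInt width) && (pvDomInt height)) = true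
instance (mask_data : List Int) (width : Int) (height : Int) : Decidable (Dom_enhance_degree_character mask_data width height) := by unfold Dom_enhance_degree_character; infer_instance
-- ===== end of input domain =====

-- B replaces A's min/max bounding-box scan over a materialized 2D grid by a search-based plan on the
-- flat list: first set pixel found with list.index gives the top row, a column-projection filter gives
-- the occupied columns whose first and last entries are the horizontal extremes (objective: alternative).

-- Python `l[i] = v` for a nonnegative in-range index (the only way both programs use it): exact there.
def pySet {α : Type} : List α → Int → α → List α
  | [], _, _ => []
  | a :: t, i, v => if i = 0 then v :: t else a :: pySet t (i - 1) v

-- ===== PORT A =====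
def enhance_degree_character (mask_data : List Int) (width : Int) (height : Int) : List Int :=
  -- mask_2d[y][x] = mask_data[y*width+x]; pyGetD is exact under Pre_ (every read index in range)
  let mask_2d : List (List Int) :=
    (PySem.List.pyRange 0 height 1).map (fun y =>
      (PySem.List.pyRange 0 width 1).map (fun x =>
        PySem.List.pyGetD mask_data (y * width + x) 0))
  let bounds :=
    (PySem.List.pyRange 0 height 1).foldl (fun (st : Int × Int × Int × Int) y =>
      (PySem.List.pyRange 0 width 1).foldl (fun st x =>
        if PySem.List.pyGetD (PySem.List.pyGetD mask_2d y []) x 0 == 1 then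
          (min st.1 x, max st.2.1 x, min st.2.2.1 y, max st.2.2.2 y)
        else st) st)
      (width, -1, height, -1)
  if bounds.1 > bounds.2.1 ∨ bounds.2.2.1 > bounds.2.2.2 then mask_data
  else
    let cleared : List (List Int) :=
      (PySem.List.pyRange 0 height 1).map (fun _ =>
        (PySem.List.pyRange 0 width 1).map (fun _ => (0 : Int)))
    let center_x := PySem.Int.floordiv (bounds.1 + bounds.2.1) 2
    let top_y := bounds.2.2.1
    let mask_2d' :=
      if 0 ≤ top_y ∧ top_y < height ∧ 0 ≤ center_x ∧ center_x < width then
        pySet cleared top_y (pySet (PySem.List.pyGetD cleared top_y []) center_x 1)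
      else cleared
    (PySem.List.pyRange 0 height 1).foldl (fun acc y =>
      (PySem.List.pyRange 0 width 1).foldl (fun acc x =>
        acc ++ [PySem.List.pyGetD (PySem.List.pyGetD mask_2d' y []) x 0]) acc) []

-- ===== PORT B =====
def enhance_degree_character_alt (mask_data : List Int) (width : Int) (height : Int) : List Int :=
  -- cells = [mask_data[y*width+x] for y in range(height) for x in range(width)]
  let cells : List Int :=
    (PySem.List.pyRange 0 height 1).flatMap (fun y =>
      (PySem.List.pyRange 0 width 1).map (fun x =>
        PySem.List.pyGetD mask_data (y * width + x) 0))
  if (1 : Int) ∈ cells then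
    -- cells.index(1): 1 ∈ cells in this branch, so the getD 0 totalization is exact
    let top_y := PySem.Int.floordiv (((PySem.List.index? cells 1).getD 0 : Nat) : Int) width
    let cols : List Int :=
      (PySem.List.pyRange 0 width 1).filter (fun x =>
        (PySem.List.pyRange 0 height 1).any (fun y =>
          PySem.List.pyGetD cells (y * width + x) 0 == 1))
    -- cols[0] / cols[-1]: cols is nonempty in this branch, so pyGetD is exact
    let center_x := PySem.Int.floordiv (PySem.List.pyGetD cols 0 0 + PySem.List.pyGetD cols (-1) 0) 2
    pySet (List.replicate (width * height).toNat 0) (top_y * width + center_x) 1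
  else mask_data

-- ===== PRECONDITION & SPEC =====
-- Pre_ excludes exactly the inputs where Python A raises IndexError: a positive grid whose flat
-- data is shorter than width*height.
def Pre_enhance_degree_character (mask_data : List Int) (width : Int) (height : Int) : Prop :=
  width ≤ 0 ∨ height ≤ 0 ∨ width * height ≤ (mask_data.length : Int)
instance (mask_data : List Int) (width : Int) (height : Int) : Decidable (Pre_enhance_degree_character mask_data width height) := by unfold Pre_enhance_degree_character; infer_instance
def pvWitness_enhance_degree_character : List Int × Int × Int := ([1, 0, 1, 0], 2, 2)

-- When width<0 and height<0 and mask_data is nonempty, A returns [] (its sentinel bounds slip past the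
-- 'no pixels found' test and every loop is empty), while B returns mask_data unchanged, the intended
-- 'nothing to enhance' behaviour for a degenerate image.
def D_enhance_degree_character (mask_data : List Int) (width : Int) (height : Int) : Prop :=
  width < 0 ∧ height < 0 ∧ mask_data ≠ []
instance (mask_data : List Int) (width : Int) (height : Int) : Decidable (D_enhance_degree_character mask_data width height) := by unfold D_enhance_degree_character; infer_instance

def Spec_enhance_degree_character (mask_data : List Int) (width : Int) (height : Int) (out : List Int) : Prop := ¬ D_enhance_degree_character mask_data width height → out = enhance_degree_character_alt mask_data width height
instance (mask_data : List Int) (width : Int) (height : Int) (out : List Int) : Decidable (Spec_enhance_degree_character mask_data width height out) := by unfold Spec_enhance_degree_character; infer_instance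

def pvDiffWitness_enhance_degree_character : List Int × Int × Int := ([1], -1, -1)
def pvDiffWitnessOut_enhance_degree_character : (List Int) × (List Int) := ([], [1])

-- ===== CLAIM (what is proved, stated in full; the proofs are below) =====
def Claim_unchanged_enhance_degree_character : Prop := ∀ (mask_data : List Int) (width : Int) (height : Int), Dom_enhance_degree_character mask_data width height → Pre_enhance_degree_character mask_data width height → Spec_enhance_degree_character mask_data width height (enhance_degree_character mask_data width height)
def Claim_changed_enhance_degree_character : Prop := Dom_enhance_degree_character (pvDiffWitness_enhance_degree_character.1) (pvDiffWitness_enhance_degree_character.2.1) (pvDiffWitness_enhance_degree_character.2.2) ∧ Pre_enhance_degree_character (pvDiffWitness_enhance_degree_character.1) (pvDiffWitness_enhance_degree_character.2.1) (pvDiffWitness_enhance_degree_character.2.2) ∧ D_enhance_degree_character (pvDiffWitness_enhance_degree_character.1) (pvDiffWitness_enhance_degree_character.2.1) (pvDiffWitness_enhance_degree_character.2.2) ∧ enhance_degree_character (pvDiffWitness_enhance_degree_character.1) (pvDiffWitness_enhance_degree_character.2.1) (pvDiffWitness_enhance_degree_character.2.2) = pvDiffWitnessOut_enhance_degree_character.1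 ∧ enhance_degree_character_alt (pvDiffWitness_enhance_degree_character.1) (pvDiffWitness_enhance_degree_character.2.1) (pvDiffWitness_enhance_degree_character.2.2) = pvDiffWitnessOut_enhance_degree_character.2 ∧ pvDiffWitnessOut_enhance_degree_character.1 ≠ pvDiffWitnessOut_enhance_degree_character.2
def Claim_exact_enhance_degree_character : Prop := ∀ (mask_data : List Int) (width : Int) (height : Int), Dom_enhance_degree_character mask_data width height → Pre_enhance_degree_character mask_data width height → D_enhance_degree_character mask_data width height → enhance_degree_character mask_data width height ≠ enhance_degree_character_alt mask_data width height

-- ===== LEMMAS AND PROOFS =====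

-- pixel value at flat index i
def gpix (m : List Int) (i : Nat) : Int := PySem.List.pyGetD m (i : Int) 0

-- A's bounds-update step, re-indexed by the flat index
def stepA (m : List Int) (W : Nat) (s : Int × Int × Int × Int) (i : Nat) : Int × Int × Int × Int :=
  if gpix m i == 1 then
    (min s.1 ((i % W : Nat) : Int), max s.2.1 ((i % W : Nat) : Int),
     min s.2.2.1 ((i / W : Nat) : Int), max s.2.2.2 ((i / W : Nat) : Int))
  else s

theorem foldl_range_mul {σ : Type} (f : σ → Nat → σ) (H W : Nat) (init : σ) :
    (List.range H).foldl (fun s y => (List.range W).foldl (fun s x => f s (y * W + x)) s) init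
    = (List.range (H * W)).foldl f init := by
  induction H generalizing init with
  | zero => simp
  | succ H ih =>
    rw [List.range_succ, List.foldl_append, ih, Nat.succ_mul, List.range_add,
        List.foldl_append, List.foldl_map]
    simp [List.foldl]

theorem flatMap_range_mul {α : Type} (f : Nat → α) (H W : Nat) :
    (List.range H).flatMap (fun y => (List.range W).map (fun x => f (y * W + x)))
    = (List.range (H * W)).map f := by
  induction H with
  | zero => simp
  | succ H ih =>
    rw [List.range_succ, List.flatMap_append, ih, Nat.succ_mul, List.range_add,
        List.map_append, List.map_map]
    simp [Function.comp_def]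

-- nested row/column pyRange loop = one flat loop over the flat indices
theorem pyfold_flatten {σ : Type} (W H : Nat) (body : σ → Int → Int → σ) (F : σ → Nat → σ)
    (hbody : ∀ (s : σ) (y x : Nat), y < H → x < W → body s (y : Int) (x : Int) = F s (y * W + x))
    (init : σ) :
    (PySem.List.pyRange 0 (H : Int) 1).foldl
      (fun st y => (PySem.List.pyRange 0 (W : Int) 1).foldl (fun st x => body st y x) st) init
    = (List.range (H * W)).foldl F init := by
  rw [PySem.List.pyRange_zero_natCast H, List.foldl_map, ← foldl_range_mul]
  apply PySem.List.foldl_congr_mem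
  intro acc y hy
  rw [PySem.List.pyRange_zero_natCast W, List.foldl_map]
  apply PySem.List.foldl_congr_mem
  intro s x hx
  exact hbody s y x (List.mem_range.mp hy) (List.mem_range.mp hx)

theorem pySet_natCast {α : Type} (l : List α) (k : Nat) (v : α) :
    pySet l (k : Int) v = l.set k v := by
  induction l generalizing k with
  | nil => simp [pySet]
  | cons a t ih =>
    cases k with
    | zero => simp [pySet]
    | succ k =>
      simp [pySet, ih]
      intro h3
      exact absurd h3 (by omega)

theorem castmin (a b : Nat) : min ((a : Nat) : Int) ((b : Nat) : Int) = ((min a b : Nat) : Int) :=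
  (Nat.cast_min a b).symm

theorem castmax (a b : Nat) : max ((a : Nat) : Int) ((b : Nat) : Int) = ((max a b : Nat) : Int) :=
  (Nat.cast_max a b).symm

theorem min_sentinel (a b : Nat) (h : b < a) : min ((a : Nat) : Int) ((b : Nat) : Int) = ((b : Nat) : Int) :=
  min_eq_right (by exact_mod_cast h.le)

theorem max_sentinel (b : Nat) : max (-1 : Int) ((b : Nat) : Int) = ((b : Nat) : Int) :=
  max_eq_right (le_trans (by norm_num) (Int.natCast_nonneg b))

theorem flat_div (W y x : Nat) (hW : 0 < W) (hx : x < W) : (y * W + x) / W = y := by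
  rw [Nat.mul_comm y W, Nat.mul_add_div hW, Nat.div_eq_of_lt hx, Nat.add_zero]

theorem flat_mod (W y x : Nat) (hx : x < W) : (y * W + x) % W = x := by
  rw [Nat.mul_comm y W, Nat.mul_add_mod, Nat.mod_eq_of_lt hx]

theorem flat_lt (W H y x : Nat) (hy : y < H) (hx : x < W) : y * W + x < H * W :=
  lt_of_lt_of_le (by rw [Nat.succ_mul]; omega : y * W + x < (y + 1) * W) (Nat.mul_le_mul_right W hy)

theorem cell_read (m : List Int) (W H y x : Nat) (hy : y < H) (hx : x < W) :
    PySem.List.pyGetD (PySem.List.pyGetD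
      ((PySem.List.pyRange 0 (H : Int) 1).map (fun y =>
        (PySem.List.pyRange 0 (W : Int) 1).map (fun x => PySem.List.pyGetD m (y * (W : Int) + x) 0)))
      (y : Int) []) (x : Int) 0 = gpix m (y * W + x) := by
  simp only [PySem.List.pyRange_zero_natCast, List.map_map, Function.comp_def,
             PySem.List.pyGetD_natCast]
  rw [PySem.List.getD_map_range _ _ _ _ hy, PySem.List.getD_map_range _ _ _ _ hx]
  rw [show ((y : Int) * (W : Int) + (x : Int)) = ((y * W + x : Nat) : Int) by push_cast; ring]
  rfl

theorem cell_value (W H ty c : Nat) (hty : ty < H) (y x : Nat) (hy : y < H) (hx : x < W) :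
    PySem.List.pyGetD (PySem.List.pyGetD
      (pySet ((PySem.List.pyRange 0 (H : Int) 1).map (fun _ =>
                (PySem.List.pyRange 0 (W : Int) 1).map (fun _ => (0 : Int))))
        (ty : Int)
        (pySet (PySem.List.pyGetD ((PySem.List.pyRange 0 (H : Int) 1).map (fun _ =>
                  (PySem.List.pyRange 0 (W : Int) 1).map (fun _ => (0 : Int))))
                 (ty : Int) []) (c : Int) 1))
      (y : Int) []) (x : Int) 0
    = if y = ty ∧ x = c then (1 : Int) else 0 := by
  simp only [PySem.List.pyRange_zero_natCast, List.map_map, Function.comp_def,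
             PySem.List.pyGetD_natCast, pySet_natCast]
  rw [PySem.List.getD_map_range _ _ _ _ hty]
  have hlen1 : y < (((List.range H).map (fun _ => (List.range W).map (fun _ => (0:Int)))).set ty
      (((List.range W).map (fun _ => (0:Int))).set c 1)).length := by simp [hy]
  rw [List.getD_eq_getElem _ _ hlen1, List.getElem_set]
  by_cases hyt : ty = y
  · rw [if_pos hyt]
    have hlen2 : x < (((List.range W).map (fun _ => (0:Int))).set c 1).length := by simp [hx]
    rw [List.getD_eq_getElem _ _ hlen2, List.getElem_set]
    by_cases hcx : c = x
    · rw [if_pos hcx, if_pos ⟨hyt.symm, hcx.symm⟩]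
    · rw [if_neg hcx, if_neg (by rintro ⟨_, h⟩; exact hcx h.symm)]
      simp
  · rw [if_neg hyt, List.getElem_map, PySem.List.getD_map_range _ _ _ _ hx,
        if_neg (by rintro ⟨h, _⟩; exact hyt h.symm)]

theorem map_eq_set (W H ty c : Nat) (hW : 0 < W) (hc : c < W) :
    (List.range (H * W)).map (fun i => if i / W = ty ∧ i % W = c then (1 : Int) else 0)
    = (List.replicate (W * H) (0 : Int)).set (ty * W + c) 1 := by
  apply List.ext_getElem
  · simp [Nat.mul_comm]
  · intro i h1 h2
    simp only [List.getElem_map, List.getElem_range, List.getElem_set, List.getElem_replicate]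
    have hdm := Nat.div_add_mod i W
    have hmod : i % W < W := Nat.mod_lt _ hW
    by_cases hEq : i = ty * W + c
    · subst hEq
      have hd : (ty * W + c) / W = ty := flat_div W ty c hW hc
      have hm : (ty * W + c) % W = c := flat_mod W ty c hc
      simp [hd, hm]
    · have hA : ¬(i / W = ty ∧ i % W = c) := by
        rintro ⟨hd', hm'⟩
        apply hEq
        rw [hd', hm', Nat.mul_comm W ty] at hdm
        omega
      have hB : ¬(ty * W + c = i) := fun h => hEq h.symm
      rw [if_neg hA, if_neg hB]

-- characterization of A's bounds fold: sentinel iff no set pixel among the first k flat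
-- indices; otherwise the four components are the extremes of the pixels seen so far
theorem scanA_char (m : List Int) (W H : Nat) (hW : 0 < W) :
    ∀ k, k ≤ H * W →
    ((∀ i, i < k → gpix m i ≠ 1) ∧
      (List.range k).foldl (stepA m W) ((W : Int), -1, (H : Int), -1) = ((W : Int), -1, (H : Int), -1)) ∨
    (∃ mn mx ty bt : Nat,
      (List.range k).foldl (stepA m W) ((W : Int), -1, (H : Int), -1) = ((mn : Int), (mx : Int), (ty : Int), (bt : Int)) ∧
      mx < W ∧ ty < H ∧ ty ≤ bt ∧
      (∃ i, i < k ∧ gpix m i = 1 ∧ i % W = mn) ∧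
      (∃ i, i < k ∧ gpix m i = 1 ∧ i % W = mx) ∧
      (∃ i, i < k ∧ gpix m i = 1 ∧ i / W = ty) ∧
      (∀ i, i < k → gpix m i = 1 → mn ≤ i % W ∧ i % W ≤ mx ∧ ty ≤ i / W)) := by
  intro k
  induction k with
  | zero => intro _; left; exact ⟨by omega, by simp⟩
  | succ k ih =>
    intro hk
    have hk' : k ≤ H * W := by omega
    have hmod : k % W < W := Nat.mod_lt _ hW
    have hdiv : k / W < H := Nat.div_lt_of_lt_mul (by rw [Nat.mul_comm W H]; omega)
    rw [List.range_succ, List.foldl_append] at *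
    simp only [List.foldl] at *
    by_cases hg : gpix m k = 1
    · rcases ih hk' with ⟨hno, hA⟩ | ⟨mn, mx, ty, bt, hA, hxW, htH, htb, w1, w2, w3, hbd⟩
      · right
        rw [hA]
        refine ⟨k % W, k % W, k / W, k / W, ?_, hmod, hdiv, le_rfl,
                ⟨k, by omega, hg, rfl⟩, ⟨k, by omega, hg, rfl⟩, ⟨k, by omega, hg, rfl⟩, ?_⟩
        · simp only [stepA, hg, beq_self_eq_true, if_pos]
          rw [min_sentinel W (k % W) hmod, max_sentinel, min_sentinel H (k / W) hdiv, max_sentinel]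
        · intro i hi hgi
          have : i = k := by
            rcases Nat.lt_succ_iff_lt_or_eq.mp hi with h | h
            · exact absurd hgi (hno i h)
            · exact h
          subst this; omega
      · right
        rw [hA]
        refine ⟨min mn (k % W), max mx (k % W), min ty (k / W), max bt (k / W), ?_, ?_, ?_, ?_, ?_, ?_, ?_, ?_⟩
        · simp only [stepA, hg, beq_self_eq_true, if_pos]
          rw [castmin mn (k % W), castmax mx (k % W), castmin ty (k / W), castmax bt (k / W)]
        · omega
        · omega
        · omega
        · rcases Nat.le_total mn (k % W) with h | h
          · obtain ⟨i, hi, hgi, hm⟩ := w1; exact ⟨i, by omega, hgi, by omega⟩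
          · exact ⟨k, by omega, hg, by omega⟩
        · rcases Nat.le_total (k % W) mx with h | h
          · obtain ⟨i, hi, hgi, hm⟩ := w2; exact ⟨i, by omega, hgi, by omega⟩
          · exact ⟨k, by omega, hg, by omega⟩
        · rcases Nat.le_total ty (k / W) with h | h
          · obtain ⟨i, hi, hgi, hm⟩ := w3; exact ⟨i, by omega, hgi, by omega⟩
          · exact ⟨k, by omega, hg, by omega⟩
        · intro i hi hgi
          rcases Nat.lt_succ_iff_lt_or_eq.mp hi with h | h
          · have := hbd i h hgi; omega
          · subst h; omega
    · rcases ih hk' with ⟨hno, hA⟩ | ⟨mn, mx, ty, bt, hA, hxW, htH, htb, w1, w2, w3, hbd⟩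
      · left
        rw [hA]
        refine ⟨?_, by simp [stepA, hg]⟩
        intro i hi
        rcases Nat.lt_succ_iff_lt_or_eq.mp hi with h | h
        · exact hno i h
        · subst h; exact hg
      · right
        rw [hA]
        refine ⟨mn, mx, ty, bt, by simp [stepA, hg], hxW, htH, htb,
                (by obtain ⟨i, hi, hgi, hm⟩ := w1; exact ⟨i, by omega, hgi, hm⟩),
                (by obtain ⟨i, hi, hgi, hm⟩ := w2; exact ⟨i, by omega, hgi, hm⟩),
                (by obtain ⟨i, hi, hgi, hm⟩ := w3; exact ⟨i, by omega, hgi, hm⟩), ?_⟩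
        intro i hi hgi
        rcases Nat.lt_succ_iff_lt_or_eq.mp hi with h | h
        · exact hbd i h hgi
        · subst h; exact absurd hgi hg

-- B's flattening comprehension is the flat list of pixels
theorem cells_eq (m : List Int) (W H : Nat) :
    ((PySem.List.pyRange 0 (H : Int) 1).flatMap (fun y =>
      (PySem.List.pyRange 0 (W : Int) 1).map (fun x =>
        PySem.List.pyGetD m (y * (W : Int) + x) 0)))
    = (List.range (H * W)).map (gpix m) := by
  rw [PySem.List.pyRange_zero_natCast H, List.flatMap_map, ← flatMap_range_mul (gpix m) H W]
  refine List.flatMap_congr ?_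
  intro y _
  rw [PySem.List.pyRange_zero_natCast W, List.map_map]
  apply List.map_congr_left
  intro x _
  simp only [Function.comp_def]
  rw [show ((y : Int) * (W : Int) + (x : Int)) = ((y * W + x : Nat) : Int) by push_cast; ring]
  rfl

-- head of a strictly increasing list is the member that bounds it below
theorem head?_of_lb {l : List Nat} {a : Nat} (hs : l.Pairwise (· < ·)) (ha : a ∈ l)
    (hlb : ∀ x ∈ l, a ≤ x) : l.head? = some a := by
  cases l with
  | nil => cases ha
  | cons b t =>
    have hab : a ≤ b := hlb b (List.mem_cons_self)
    rcases List.mem_cons.mp ha with h | h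
    · rw [h]; rfl
    · have := (List.pairwise_cons.mp hs).1 a h
      omega

-- last of a strictly increasing list is the member that bounds it above
theorem getLast?_of_ub {l : List Nat} {a : Nat} (hs : l.Pairwise (· < ·)) (ha : a ∈ l)
    (hub : ∀ x ∈ l, x ≤ a) : l.getLast? = some a := by
  induction l with
  | nil => cases ha
  | cons b t ih =>
    cases t with
    | nil =>
      rcases List.mem_cons.mp ha with h | h
      · rw [h]; rfl
      · cases h
    | cons c t' =>
      rw [List.getLast?_cons_cons]
      rcases List.mem_cons.mp ha with h | h
      · subst h
        have := (List.pairwise_cons.mp hs).1 c List.mem_cons_self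
        have := hub c (by simp)
        omega
      · exact ih (List.pairwise_cons.mp hs).2 h (fun x hx => hub x (List.mem_cons_of_mem b hx))

theorem A_degenerate (m : List Int) (w h : Int) (hwh : w ≤ 0 ∨ h ≤ 0) :
    enhance_degree_character m w h = if w > -1 ∨ h > -1 then m else [] := by
  by_cases hh : h ≤ 0
  · simp only [enhance_degree_character, PySem.List.pyRange_one_eq_nil hh,
               List.foldl_nil, List.map_nil]
  · have hw : w ≤ 0 := hwh.resolve_right hh
    rw [if_pos (Or.inr (by omega))]
    simp only [enhance_degree_character, PySem.List.pyRange_one_eq_nil hw,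
               List.foldl_nil, List.map_nil]
    rw [List.foldl_fixed, if_pos (Or.inr (by omega : (h:Int) > -1))]

theorem B_degenerate (m : List Int) (w h : Int) (hwh : w ≤ 0 ∨ h ≤ 0) :
    enhance_degree_character_alt m w h = m := by
  by_cases hh : h ≤ 0
  · simp only [enhance_degree_character_alt, PySem.List.pyRange_one_eq_nil hh,
               List.flatMap_nil]
    rw [if_neg (by simp)]
  · have hw : w ≤ 0 := hwh.resolve_right hh
    simp only [enhance_degree_character_alt, PySem.List.pyRange_one_eq_nil hw, List.map_nil]
    rw [if_neg (by simp)]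

theorem main_pos (m : List Int) (W H : Nat) (hW : 0 < W) (_hH : 0 < H) :
    enhance_degree_character m (W : Int) (H : Int) = enhance_degree_character_alt m (W : Int) (H : Int) := by
  simp only [enhance_degree_character, enhance_degree_character_alt]
  rw [cells_eq m W H]
  rw [pyfold_flatten W H _ (stepA m W) ?hbA]
  case hbA =>
    intro s y x hy hx
    rw [cell_read m W H y x hy hx]
    simp only [stepA, flat_div W y x hW hx, flat_mod W y x hx]
  rcases scanA_char m W H hW (H * W) le_rfl with ⟨hno, hA⟩ | ⟨mn, mx, ty, bt, hA, hxW, htH, htb, w1, w2, w3, hbd⟩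
  · rw [hA]
    rw [if_pos (Or.inl (show (W : Int) > -1 by omega))]
    rw [if_neg ?hmem]
    case hmem =>
      intro hmem
      obtain ⟨i, hi, hgi⟩ := List.mem_map.mp hmem
      exact hno i (List.mem_range.mp hi) hgi
  · rw [hA]
    -- facts about the extremes
    have hmnmx : mn ≤ mx := by
      obtain ⟨i, hi, hgi, hm⟩ := w2
      have := hbd i hi hgi; omega
    have hcW : (mn + mx) / 2 < W := by omega
    have hcx : PySem.Int.floordiv ((mn : Int) + (mx : Int)) 2 = (((mn + mx) / 2 : Nat) : Int) := by
      rw [show ((mn : Int) + (mx : Int)) = ((mn + mx : Nat) : Int) by push_cast; ring,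
          show (2 : Int) = ((2 : Nat) : Int) by norm_num, PySem.Int.floordiv_natCast]
    rw [if_neg (by push_cast; omega :
          ¬(((mn : Int), (mx : Int), (ty : Int), (bt : Int)).1 > ((mn : Int), (mx : Int), (ty : Int), (bt : Int)).2.1
            ∨ ((mn : Int), (mx : Int), (ty : Int), (bt : Int)).2.2.1 > ((mn : Int), (mx : Int), (ty : Int), (bt : Int)).2.2.2))]
    rw [hcx]
    rw [if_pos (by push_cast; omega :
          (0 : Int) ≤ (ty : Int) ∧ (ty : Int) < (H : Int) ∧ (0 : Int) ≤ (((mn + mx) / 2 : Nat) : Int)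
            ∧ (((mn + mx) / 2 : Nat) : Int) < (W : Int))]
    rw [pyfold_flatten W H _ (fun (s : List Int) i => s ++ [if i / W = ty ∧ i % W = (mn + mx) / 2 then (1 : Int) else 0]) ?hbF]
    case hbF =>
      intro s y x hy hx
      rw [cell_value W H ty ((mn + mx) / 2) htH y x hy hx]
      simp only [flat_div W y x hW hx, flat_mod W y x hx]
    rw [PySem.List.foldl_append_singleton_eq_map, List.nil_append,
        map_eq_set W H ty ((mn + mx) / 2) hW hcW]
    -- B side
    have hmem : (1 : Int) ∈ (List.range (H * W)).map (gpix m) := by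
      obtain ⟨i, hi, hgi, _⟩ := w1
      exact List.mem_map.mpr ⟨i, List.mem_range.mpr hi, hgi⟩
    rw [if_pos hmem]
    -- the flat pixel list
    set cells := (List.range (H * W)).map (gpix m) with hcells
    -- index of the first 1
    obtain ⟨k0, hk0⟩ := Option.isSome_iff_exists.mp ((PySem.List.index?_isSome_iff _ _).mpr hmem)
    obtain ⟨hk0len, hk0val, hk0min⟩ := PySem.List.getElem_of_index?_eq_some hk0
    have hclen : cells.length = H * W := by simp [hcells]
    have hk0N : k0 < H * W := hclen ▸ hk0len
    have hk0pix : gpix m k0 = 1 := by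
      have : cells[k0] = gpix m k0 := by simp [hcells]
      rw [← this]; exact hk0val
    have hk0least : ∀ j, j < k0 → gpix m j ≠ 1 := by
      intro j hj hgj
      have hjN : j < H * W := by omega
      have : cells[j]'(by omega) = gpix m j := by simp [hcells]
      exact hk0min j (by omega) (this.trans hgj)
    -- top row: k0 / W = ty
    have htop : k0 / W = ty := by
      obtain ⟨j, hj, hgj, hje⟩ := w3
      have h1 : ty ≤ k0 / W := (hbd k0 hk0N hk0pix).2.2
      have h2 : k0 ≤ j := by
        by_contra h
        exact hk0least j (by omega) hgj
      have : k0 / W ≤ j / W := Nat.div_le_div_right h2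
      omega
    rw [hk0, Option.getD_some]
    have htopcast : PySem.Int.floordiv ((k0 : Nat) : Int) ((W : Nat) : Int) = ((ty : Nat) : Int) := by
      rw [PySem.Int.floordiv_natCast, htop]
    rw [htopcast]
    -- occupied columns
    have hq : ∀ x ∈ List.range W,
        ((PySem.List.pyRange 0 (H : Int) 1).any (fun y =>
          PySem.List.pyGetD cells (y * ((W : Nat) : Int) + ((x : Nat) : Int)) 0 == 1))
        = (List.range H).any (fun y => gpix m (y * W + x) == 1) := by
      intro x hx
      have hxW' : x < W := List.mem_range.mp hx
      rw [PySem.List.pyRange_zero_natCast H, List.any_map]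
      apply PySem.List.any_congr_mem
      intro y hy
      have hyH : y < H := List.mem_range.mp hy
      simp only [Function.comp_def]
      rw [show ((y : Int) * (W : Int) + (x : Int)) = ((y * W + x : Nat) : Int) by push_cast; ring,
          PySem.List.pyGetD_natCast, hcells,
          PySem.List.getD_map_range _ _ _ _ (flat_lt W H y x hyH hxW')]
    have hcols :
        ((PySem.List.pyRange 0 (W : Int) 1).filter (fun x =>
          (PySem.List.pyRange 0 (H : Int) 1).any (fun y =>
            PySem.List.pyGetD cells (y * ((W : Nat) : Int) + x) 0 == 1)))
        = ((List.range W).filter (fun x => (List.range H).any (fun y => gpix m (y * W + x) == 1))).map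
            (fun n => ((n : Nat) : Int)) := by
      rw [PySem.List.pyRange_zero_natCast W, List.filter_map]
      congr 1
      apply List.filter_congr
      intro x hx
      simpa using hq x hx
    rw [hcols]
    set q : Nat → Bool := fun x => (List.range H).any (fun y => gpix m (y * W + x) == 1) with hqdef
    set fl := (List.range W).filter q with hfl
    -- fl is strictly increasing
    have hflsort : fl.Pairwise (· < ·) := (List.pairwise_lt_range).filter q
    -- membership and bounds in fl
    have hmemfl : ∀ c : Nat, c ∈ fl ↔ (c < W ∧ ∃ y, y < H ∧ gpix m (y * W + c) = 1) := by
      intro c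
      rw [hfl, List.mem_filter, List.mem_range, hqdef]
      simp only [List.any_eq_true, List.mem_range, beq_iff_eq]
    have hmnfl : mn ∈ fl := by
      obtain ⟨i, hi, hgi, hm⟩ := w1
      refine (hmemfl mn).mpr ⟨by omega, i / W, by
        constructor
        · exact Nat.div_lt_of_lt_mul (by rw [Nat.mul_comm W H]; omega)
        · rw [show i / W * W + mn = i by rw [← hm]; rw [Nat.mul_comm]; exact Nat.div_add_mod i W]; exact hgi⟩
    have hmxfl : mx ∈ fl := by
      obtain ⟨i, hi, hgi, hm⟩ := w2
      refine (hmemfl mx).mpr ⟨hxW, i / W, by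
        constructor
        · exact Nat.div_lt_of_lt_mul (by rw [Nat.mul_comm W H]; omega)
        · rw [show i / W * W + mx = i by rw [← hm]; rw [Nat.mul_comm]; exact Nat.div_add_mod i W]; exact hgi⟩
    have hlb : ∀ c ∈ fl, mn ≤ c := by
      intro c hc
      obtain ⟨hcW', y, hyH, hgy⟩ := (hmemfl c).mp hc
      have := hbd (y * W + c) (flat_lt W H y c hyH hcW') hgy
      rw [flat_mod W y c hcW'] at this; omega
    have hub : ∀ c ∈ fl, c ≤ mx := by
      intro c hc
      obtain ⟨hcW', y, hyH, hgy⟩ := (hmemfl c).mp hc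
      have := hbd (y * W + c) (flat_lt W H y c hyH hcW') hgy
      rw [flat_mod W y c hcW'] at this; omega
    have hhead : fl.head? = some mn := head?_of_lb hflsort hmnfl hlb
    have hlast : fl.getLast? = some mx := getLast?_of_ub hflsort hmxfl hub
    -- cols[0] and cols[-1]
    have hget0 : PySem.List.pyGetD (fl.map (fun n => ((n : Nat) : Int))) 0 0 = (mn : Int) := by
      rw [PySem.List.pyGetD_zero, List.getD, ← List.head?_eq_getElem?, List.head?_map, hhead]
      rfl
    have hne : fl.map (fun n => ((n : Nat) : Int)) ≠ [] := by
      intro h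
      rw [List.map_eq_nil_iff.mp h] at hmnfl
      cases hmnfl
    have hgetlast : PySem.List.pyGetD (fl.map (fun n => ((n : Nat) : Int))) (-1) 0 = (mx : Int) := by
      rw [PySem.List.pyGetD_neg_one _ _ hne]
      have : (fl.map (fun n => ((n : Nat) : Int))).getLast? = some ((mx : Nat) : Int) := by
        rw [List.getLast?_map, hlast]; rfl
      have h2 := List.getLast?_eq_some_getLast (l := fl.map (fun n => ((n : Nat) : Int))) hne
      rw [h2] at this
      exact Option.some_inj.mp this
    rw [hget0, hgetlast, hcx]
    rw [show ((W : Int) * (H : Int)).toNat = W * H by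
          rw [show ((W : Int) * (H : Int)) = ((W * H : Nat) : Int) by push_cast; ring, Int.toNat_natCast]]
    rw [show ((ty : Int) * (W : Int) + (((mn + mx) / 2 : Nat) : Int)) = ((ty * W + (mn + mx) / 2 : Nat) : Int) by push_cast; ring,
        pySet_natCast, Nat.mul_comm W H]

theorem main_all (m : List Int) (w h : Int)
    (hnD : ¬(w < 0 ∧ h < 0 ∧ m ≠ [])) :
    enhance_degree_character m w h = enhance_degree_character_alt m w h := by
  by_cases hpos : 0 < w ∧ 0 < h
  · obtain ⟨hw, hh⟩ := hpos
    have e1 : w = ((w.toNat : Nat) : Int) := by omega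
    have e2 : h = ((h.toNat : Nat) : Int) := by omega
    rw [e1, e2]
    exact main_pos m w.toNat h.toNat (by omega) (by omega)
  · have hwh : w ≤ 0 ∨ h ≤ 0 := by omega
    rw [A_degenerate m w h hwh, B_degenerate m w h hwh]
    split_ifs with hcond
    · rfl
    · have : m = [] := by
        by_contra hm
        exact hnD ⟨by omega, by omega, hm⟩
      rw [this]

-- ===== VERDICT (by name: the statement is the Claim_ definition above) =====
theorem enhance_degree_character_spec : Claim_unchanged_enhance_degree_character := by
  intro mask_data width height _ _ hnD
  exact main_all mask_data width height hnD

theorem enhance_degree_character_changed : Claim_changed_enhance_degree_character := by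
  unfold Claim_changed_enhance_degree_character; decide

theorem enhance_degree_character_tight : Claim_exact_enhance_degree_character := by
  intro mask_data width height _ _ hD
  obtain ⟨hw, hh, hm⟩ := hD
  rw [A_degenerate mask_data width height (Or.inl (by omega)),
      B_degenerate mask_data width height (Or.inl (by omega)),
      if_neg (by omega : ¬(width > -1 ∨ height > -1))]
  exact fun e => hm e.symm
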